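-- pv_equiv track=rewrite | github.com/ensia96/my_project | pyango/testy.py | get_len_of_str
-- ===== SOURCE A (Python) =====
-- def get_len_of_str(string): # get_len_of_str("sdfwevdfggtehbd")
--     alist = []
--     for i in string:
--         if string.count(i) > 1:
--     	    a = string.split(i)
--     for j in a:
--         b = len(j)
--         alist.append(b)
--     alist.sort()
--     return alist[-1]
-- ===== SOURCE B (Python) =====
-- def get_len_of_str(string):
--     # One pass to count characters, one pass to find the last duplicated
--     # character c, one run-length pass computing the longest stretch between
--     # occurrences of c (no split lists, no sort).
--     counts = {}
--     for ch in string: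
--         counts[ch] = counts.get(ch, 0) + 1
--     c = None
--     for ch in string:
--         if counts[ch] > 1:
--             c = ch
--     if c is None:
--         return len(string)  # no separator: the whole string is the only segment
--     best = 0
--     cur = 0
--     for ch in string:
--         if ch == c:
--             if cur > best:
--                 best = cur
--             cur = 0
--         else:
--             cur += 1
--     return max(best, cur)
-- ===== Notes on version B (the rewrite author's own statement) =====
-- stated objective: faster
-- what changed: A calls string.count(i) for every character (quadratic), splits by the last duplicated character, materializes all segments, collects their lengths and sorts them to take the largest; B builds a character-count dict in one pass, picks the last duplicated character, and computes the longest stretch between its occurrences with a single run-length scan keeping a running maximum (no split lists, no sort).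
import Mathlib
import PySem

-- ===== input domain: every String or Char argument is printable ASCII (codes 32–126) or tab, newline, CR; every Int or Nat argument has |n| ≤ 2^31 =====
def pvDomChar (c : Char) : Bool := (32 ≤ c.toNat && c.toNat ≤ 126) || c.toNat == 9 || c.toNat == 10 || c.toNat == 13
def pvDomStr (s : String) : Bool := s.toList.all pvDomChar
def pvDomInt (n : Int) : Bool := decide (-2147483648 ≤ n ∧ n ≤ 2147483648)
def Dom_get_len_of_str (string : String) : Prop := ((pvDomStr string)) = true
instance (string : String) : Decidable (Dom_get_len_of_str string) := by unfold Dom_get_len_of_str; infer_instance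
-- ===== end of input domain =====

-- B replaces A's split-by-last-duplicated-char + per-segment lengths + sort + last
-- by a counting dict and a single run-length pass taking a running maximum (objective: faster).

-- ===== PORT A =====
def get_len_of_str (string : String) : Int :=
  -- a = string.split(i) for the LAST i with string.count(i) > 1; unbound (NameError) if none
  let a : Option (List String) :=
    string.toList.foldl
      (fun (a : Option (List String)) (i : Char) =>
        if PySem.Str.count string (String.ofList [i]) > 1 then
          PySem.Str.split? string (String.ofList [i])  -- sep is one char (never ""), so always `some`
        else a)
      none
  match a with
  | none => 0  -- Python raises NameError here (a unbound); excluded by Pre_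
  | some aa =>
    let alist : List Int := aa.foldl (fun alist j => alist ++ [PySem.Str.len j]) []
    let alist' := PySem.List.sorted alist (fun x => x) false
    (PySem.List.pyGet? alist' (-1)).getD 0  -- split returns ≥ 1 piece, so never none

-- ===== PORT B =====
def get_len_of_str_alt (string : String) : Int :=
  let cs := string.toList
  let counts : PySem.Dict Char Int :=
    cs.foldl (fun (d : PySem.Dict Char Int) ch => d.insert ch (d.getD ch 0 + 1)) PySem.Dict.empty
  let c : Option Char :=
    cs.foldl (fun (c : Option Char) ch => if counts.getD ch 0 > 1 then some ch else c) none
  match c with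
  | none => PySem.Str.len string  -- no separator: the whole string is the only segment
  | some c =>
    let p : Int × Int :=
      cs.foldl
        (fun (p : Int × Int) ch =>
          if ch = c then (if p.2 > p.1 then (p.2, 0) else (p.1, 0)) else (p.1, p.2 + 1))
        (0, 0)
    max p.1 p.2

-- ===== PRECONDITION & SPEC =====
-- Pre_ excludes exactly the strings with no duplicated character, on which A raises
-- NameError ('a' is never assigned).
def Pre_get_len_of_str (string : String) : Prop := ¬ string.toList.Nodup
instance (string : String) : Decidable (Pre_get_len_of_str string) := by
  unfold Pre_get_len_of_str; infer_instance
def pvWitness_get_len_of_str : String := "abcbc"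

def Spec_get_len_of_str (string : String) (out : Int) : Prop := out = get_len_of_str_alt string
instance (string : String) (out : Int) : Decidable (Spec_get_len_of_str string out) := by
  unfold Spec_get_len_of_str; infer_instance

-- ===== CLAIM (what is proved, stated in full; the proofs are below) =====
def Claim_equal_get_len_of_str : Prop := ∀ (string : String), Dom_get_len_of_str string → Pre_get_len_of_str string → Spec_get_len_of_str string (get_len_of_str string)

-- ===== LEMMAS AND PROOFS =====

lemma count_go_singleton (c : Char) :
    ∀ (fuel : Nat) (l : List Char) (acc : Nat), l.length ≤ fuel →
      PySem.Chars.count.go [c] fuel l acc = acc + l.count c := by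
  intro fuel
  induction fuel with
  | zero =>
    intro l acc h
    have : l = [] := List.length_eq_zero_iff.mp (Nat.le_zero.mp h)
    subst this
    simp [PySem.Chars.count.go]
  | succ f ih =>
    intro l acc h
    cases l with
    | nil => simp [PySem.Chars.count.go]
    | cons x t =>
      have ht : t.length ≤ f := by simp at h; omega
      simp only [PySem.Chars.count.go]
      by_cases hx : c = x
      · subst hx
        have hp : [c].isPrefixOf (c :: t) = true := by simp [List.isPrefixOf]
        rw [if_pos hp]
        simp only [List.length_singleton, List.drop_one, List.tail_cons]
        rw [ih t (acc+1) ht]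
        simp [List.count_cons]
        omega
      · have hp : [c].isPrefixOf (x :: t) = false := by
          simp [List.isPrefixOf]
          exact fun hh => hx (by simpa using hh)
        rw [if_neg (by simp [hp])]
        rw [ih t acc ht]
        simp [List.count_cons, hx]
        intro hh
        exact absurd hh.symm hx

lemma chars_count_singleton (c : Char) (l : List Char) :
    PySem.Chars.count l [c] = l.count c := by
  unfold PySem.Chars.count
  rw [if_neg (by simp)]
  simpa using count_go_singleton c l.length l 0 le_rfl

def mySplit (c : Char) : List Char → List (List Char)
  | [] => [[]]
  | x :: xs =>
    if x = c then [] :: mySplit c xs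
    else
      match mySplit c xs with
      | [] => [[x]]
      | h :: t => (x :: h) :: t

lemma mySplit_ne_nil (c : Char) (l : List Char) : mySplit c l ≠ [] := by
  cases l with
  | nil => simp [mySplit]
  | cons x xs =>
    simp only [mySplit]
    split
    · simp
    · split <;> simp

lemma splitOn_go_spec (c : Char) :
    ∀ (fuel : Nat) (l cur : List Char) (acc : List (List Char)), l.length ≤ fuel →
      PySem.Chars.splitOn.go [c] fuel l cur acc =
        acc.reverse ++
          (match mySplit c l with
           | [] => [cur.reverse]
           | h :: t => (cur.reverse ++ h) :: t) := by
  intro fuel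
  induction fuel with
  | zero =>
    intro l cur acc h
    have : l = [] := List.length_eq_zero_iff.mp (Nat.le_zero.mp h)
    subst this
    simp [PySem.Chars.splitOn.go, mySplit]
  | succ f ih =>
    intro l cur acc h
    cases l with
    | nil => simp [PySem.Chars.splitOn.go, mySplit]
    | cons x t =>
      have ht : t.length ≤ f := by simp at h; omega
      simp only [PySem.Chars.splitOn.go]
      by_cases hx : c = x
      · subst hx
        have hp : [c].isPrefixOf (c :: t) = true := by simp [List.isPrefixOf]
        rw [if_pos hp]
        simp only [List.length_singleton, List.drop_one, List.tail_cons]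
        rw [ih t [] (cur.reverse :: acc) ht]
        obtain ⟨h1, t1, hht⟩ : ∃ h1 t1, mySplit c t = h1 :: t1 := by
          cases hmt : mySplit c t with
          | nil => exact absurd hmt (mySplit_ne_nil c t)
          | cons a b => exact ⟨a, b, rfl⟩
        simp [mySplit, hht]
      · have hp : [c].isPrefixOf (x :: t) = false := by
          simp [List.isPrefixOf]
          exact fun hh => hx (by simpa using hh)
        rw [if_neg (by simp [hp])]
        rw [ih t (x :: cur) acc ht]
        obtain ⟨h1, t1, hht⟩ : ∃ h1 t1, mySplit c t = h1 :: t1 := by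
          cases hmt : mySplit c t with
          | nil => exact absurd hmt (mySplit_ne_nil c t)
          | cons a b => exact ⟨a, b, rfl⟩
        have hx' : ¬ (x = c) := fun hh => hx hh.symm
        simp [mySplit, hht, hx']

lemma splitOn_eq_mySplit (c : Char) (l : List Char) :
    PySem.Chars.splitOn l [c] = mySplit c l := by
  unfold PySem.Chars.splitOn
  rw [splitOn_go_spec c (l.length + 1) l [] [] (by omega)]
  obtain ⟨h1, t1, hht⟩ : ∃ h1 t1, mySplit c l = h1 :: t1 := by
    cases hmt : mySplit c l with
    | nil => exact absurd hmt (mySplit_ne_nil c l)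
    | cons a b => exact ⟨a, b, rfl⟩
  simp [hht]

lemma foldl_last_filter {β : Type} (P : Char → Prop) [DecidablePred P] (g : Char → β) :
    ∀ (l : List Char) (acc : β),
      l.foldl (fun a i => if P i then g i else a) acc =
        ((l.filter (fun i => decide (P i))).getLast?).elim acc g := by
  intro l
  induction l with
  | nil => intro acc; simp
  | cons x xs ih =>
    intro acc
    by_cases hx : P x
    · rw [List.foldl_cons, if_pos hx, ih, List.filter_cons_of_pos (by simpa using hx)]
      cases hfs : xs.filter (fun i => decide (P i)) with
      | nil => simp [hfs]
      | cons y t =>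
        rw [List.getLast?_cons_cons]
        cases hgl : (y :: t).getLast? with
        | none => simp at hgl
        | some a => simp [hgl]
    · rw [List.foldl_cons, if_neg hx, ih,
        List.filter_cons_of_neg (by simpa using hx)]

lemma mySplit_cons_self (c : Char) (xs : List Char) :
    mySplit c (c :: xs) = [] :: mySplit c xs := by simp [mySplit]

lemma mySplit_cons_ne (c x : Char) (xs : List Char) (h1 : List Char) (t1 : List (List Char))
    (hx : x ≠ c) (hht : mySplit c xs = h1 :: t1) :
    mySplit c (x :: xs) = (x :: h1) :: t1 := by
  simp [mySplit, hx, hht]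

def segFold : List (List Char) → Int × Int → Int × Int
  | [], p => p
  | s :: rest, p =>
    if rest = [] then (p.1, p.2 + s.length)
    else segFold rest (max p.1 (p.2 + s.length), 0)

lemma fold_chars_eq_segFold (c : Char) :
    ∀ (l : List Char) (b k : Int),
      l.foldl
        (fun (p : Int × Int) ch =>
          if ch = c then (if p.2 > p.1 then (p.2, 0) else (p.1, 0)) else (p.1, p.2 + 1))
        (b, k) = segFold (mySplit c l) (b, k) := by
  intro l
  induction l with
  | nil => intro b k; simp [mySplit, segFold]
  | cons x xs ih =>
    intro b k
    obtain ⟨h1, t1, hht⟩ : ∃ h1 t1, mySplit c xs = h1 :: t1 := by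
      cases hmt : mySplit c xs with
      | nil => exact absurd hmt (mySplit_ne_nil c xs)
      | cons a b => exact ⟨a, b, rfl⟩
    have hlen : ((x :: h1).length : Int) = (h1.length : Int) + 1 := by simp
    rw [List.foldl_cons]
    by_cases hx : x = c
    · subst hx
      have hstep :
          (if x = x then (if (b,k).2 > (b,k).1 then ((b,k).2, (0:Int)) else ((b,k).1, 0))
           else ((b,k).1, (b,k).2 + 1)) = (max b k, 0) := by
        rw [if_pos rfl]
        split <;> simp <;> omega
      rw [hstep, ih, hht, mySplit_cons_self, hht]
      have hr : segFold ([] :: h1 :: t1) (b, k) = segFold (h1 :: t1) (max b k, 0) := by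
        simp [segFold]
      rw [hr]
    · rw [if_neg (by simpa using hx), ih, hht, mySplit_cons_ne c x xs h1 t1 hx hht]
      cases t1 with
      | nil =>
        simp only [segFold, if_pos rfl, hlen]
        have : k + (1:Int) + (h1.length : Int) = k + ((h1.length : Int) + 1) := by omega
        rw [this]
      | cons u v =>
        simp only [segFold, if_neg (List.cons_ne_nil u v), hlen]
        have : k + (1:Int) + (h1.length : Int) = k + ((h1.length : Int) + 1) := by omega
        rw [this]


lemma segFold_spec :
    ∀ (t : List (List Char)) (s : List Char) (b k : Int), 0 ≤ k →
      max (segFold (s :: t) (b, k)).1 (segFold (s :: t) (b, k)).2 =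
        max (max b (k + s.length)) ((t.map (fun u => (u.length : Int))).foldl max 0) := by
  intro t
  induction t with
  | nil =>
    intro s b k hk
    have hnil : segFold [s] (b, k) = (b, k + s.length) := by simp [segFold]
    rw [hnil, List.map_nil, List.foldl_nil]
    have h1 : (0:Int) ≤ k + s.length := by positivity
    rw [max_eq_left (le_trans h1 (le_max_right _ _))]
  | cons s' t' ih =>
    intro s b k hk
    have h0 : segFold (s :: s' :: t') (b, k) = segFold (s' :: t') (max b (k + s.length), 0) := by
      simp [segFold]
    rw [h0, ih s' (max b (k + s.length)) 0 le_rfl]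
    rw [List.map_cons, List.foldl_cons, zero_add,
      max_comm (0:Int) ((s'.length : Int)), List.foldl_assoc, max_assoc]

lemma sorted_last_max (l : List Int) (h0 : ∀ x ∈ l, 0 ≤ x) (hn : l ≠ []) :
    (PySem.List.pyGet? (PySem.List.sorted l (fun x => x) false) (-1)).getD 0 = l.foldl max 0 := by
  rw [PySem.List.pyGet?_neg_one]
  have hsn : PySem.List.sorted l (fun x => x) false ≠ [] := by
    intro h
    exact hn ((PySem.List.sorted_eq_nil_iff l (fun x => x) false).mp h)
  rcases List.eq_nil_or_concat (PySem.List.sorted l (fun x => x) false) with h | ⟨ys, m, hys⟩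
  · exact absurd h hsn
  rw [List.concat_eq_append] at hys
  rw [hys]
  have hlast : (ys ++ [m]).getLast?.getD 0 = m := by simp
  rw [hlast]
  have hpw := PySem.List.sorted_pairwise l (fun x => x)
  rw [hys] at hpw
  have hmax_le : ∀ x ∈ ys ++ [m], x ≤ m := by
    intro x hx
    rcases List.mem_append.mp hx with h | h
    · exact (List.pairwise_append.mp hpw).2.2 x h m (by simp)
    · simp at h; omega
  have hm_mem : m ∈ l := by
    rw [← PySem.List.mem_sorted l (fun x => x) false m, hys]; simp
  have h1 : m ≤ l.foldl max 0 := (PySem.List.le_foldl_max l 0).2 m hm_mem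
  have h2 : l.foldl max 0 ≤ m := by
    rcases PySem.List.foldl_max_mem l 0 with h | h
    · rw [h]; exact h0 m hm_mem
    · have : l.foldl max 0 ∈ ys ++ [m] := by
        rw [← hys, PySem.List.mem_sorted]; exact h
      exact hmax_le _ this
  omega

lemma value_eq (string : String) (c : Char) :
    (match PySem.Str.split? string (String.ofList [c]) with
     | none => (0 : Int)
     | some aa =>
       (PySem.List.pyGet?
         (PySem.List.sorted (aa.foldl (fun alist j => alist ++ [PySem.Str.len j]) []) (fun x => x) false)
         (-1)).getD 0) =
    (max
      (string.toList.foldl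
        (fun (p : Int × Int) ch =>
          if ch = c then (if p.2 > p.1 then (p.2, 0) else (p.1, 0)) else (p.1, p.2 + 1))
        (0, 0)).1
      (string.toList.foldl
        (fun (p : Int × Int) ch =>
          if ch = c then (if p.2 > p.1 then (p.2, 0) else (p.1, 0)) else (p.1, p.2 + 1))
        (0, 0)).2) := by
  have hsplit : PySem.Str.split? string (String.ofList [c]) =
      some ((mySplit c string.toList).map String.ofList) := by
    show Option.map _ (PySem.Chars.split? _ _) = _
    rw [show (String.ofList [c]).toList = [c] by simp]
    unfold PySem.Chars.split?
    rw [if_neg (by simp)]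
    rw [splitOn_eq_mySplit]
    rfl
  rw [hsplit]
  simp only []
  -- A side: alist = lengths of the segments
  have halist : ((mySplit c string.toList).map String.ofList).foldl
      (fun alist j => alist ++ [PySem.Str.len j]) [] =
      (mySplit c string.toList).map (fun u => (u.length : Int)) := by
    rw [PySem.List.foldl_append_singleton_eq_map]
    simp [PySem.Str.len]
  rw [halist]
  obtain ⟨s, t, hst⟩ : ∃ s t, mySplit c string.toList = s :: t := by
    cases hmt : mySplit c string.toList with
    | nil => exact absurd hmt (mySplit_ne_nil c string.toList)
    | cons a b => exact ⟨a, b, rfl⟩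
  rw [sorted_last_max _ (by intro x hx; simp at hx; obtain ⟨u, _, hu⟩ := hx; omega)
      (by simp [hst]), fold_chars_eq_segFold, hst, segFold_spec t s 0 0 le_rfl]
  rw [List.map_cons, List.foldl_cons, zero_add]
  conv_lhs => rw [show max (0:Int) ((s.length : Int)) = max (max (0:Int) ((s.length : Int))) 0 from
    (max_eq_left (le_max_left 0 _)).symm]
  rw [List.foldl_assoc]

-- one-char needle str.count is char count
lemma str_count_char (string : String) (i : Char) :
    PySem.Str.count string (String.ofList [i]) = string.toList.count i := by
  rw [PySem.Str.count_eq, show (String.ofList [i]).toList = [i] from by simp,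
    chars_count_singleton]

-- A's loop keeps the split by the LAST character whose count exceeds 1
lemma portA_eq (string : String) :
    get_len_of_str string =
      ((string.toList.filter
          (fun i => decide (PySem.Str.count string (String.ofList [i]) > 1))).getLast?).elim (0 : Int)
        (fun d =>
          match PySem.Str.split? string (String.ofList [d]) with
          | none => (0 : Int)
          | some aa =>
            (PySem.List.pyGet?
              (PySem.List.sorted (aa.foldl (fun alist j => alist ++ [PySem.Str.len j]) [])
                (fun x => x) false)
              (-1)).getD 0) := by
  simp only [get_len_of_str]
  rw [foldl_last_filter (fun i => PySem.Str.count string (String.ofList [i]) > 1)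
      (fun i => PySem.Str.split? string (String.ofList [i])) string.toList none]
  cases hL : (string.toList.filter
      (fun i => decide (PySem.Str.count string (String.ofList [i]) > 1))).getLast? with
  | none => simp
  | some d => simp

-- B's loop keeps the LAST character whose dict count exceeds 1
lemma portB_eq (string : String) :
    get_len_of_str_alt string =
      ((string.toList.filter
          (fun ch => decide ((string.toList.foldl
              (fun (d : PySem.Dict Char Int) ch => d.insert ch (d.getD ch 0 + 1))
              PySem.Dict.empty).getD ch 0 > 1))).getLast?).elim
        (PySem.Str.len string)
        (fun c =>
          max
            (string.toList.foldl
              (fun (p : Int × Int) ch =>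
                if ch = c then (if p.2 > p.1 then (p.2, 0) else (p.1, 0)) else (p.1, p.2 + 1))
              (0, 0)).1
            (string.toList.foldl
              (fun (p : Int × Int) ch =>
                if ch = c then (if p.2 > p.1 then (p.2, 0) else (p.1, 0)) else (p.1, p.2 + 1))
              (0, 0)).2) := by
  simp only [get_len_of_str_alt]
  rw [foldl_last_filter
      (fun ch => (string.toList.foldl
          (fun (d : PySem.Dict Char Int) ch => d.insert ch (d.getD ch 0 + 1))
          PySem.Dict.empty).getD ch 0 > 1)
      (fun ch => some ch) string.toList none]
  cases hL : (string.toList.filter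
      (fun ch => decide ((string.toList.foldl
          (fun (d : PySem.Dict Char Int) ch => d.insert ch (d.getD ch 0 + 1))
          PySem.Dict.empty).getD ch 0 > 1))).getLast? with
  | none => simp
  | some d => simp

-- the two loops test the same condition, so they keep the same character
lemma filters_eq (string : String) :
    string.toList.filter
        (fun ch => decide ((string.toList.foldl
            (fun (d : PySem.Dict Char Int) ch => d.insert ch (d.getD ch 0 + 1))
            PySem.Dict.empty).getD ch 0 > 1)) =
      string.toList.filter
        (fun i => decide (PySem.Str.count string (String.ofList [i]) > 1)) := by
  apply List.filter_congr
  intro i _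
  have h2 : (string.toList.foldl
      (fun (d : PySem.Dict Char Int) ch => d.insert ch (d.getD ch 0 + 1))
      PySem.Dict.empty).getD i 0 = (string.toList.count i : Int) := by
    rw [PySem.Dict.getD_foldl_insert_add_one]
    norm_num
  rw [h2, str_count_char]
  simp only [decide_eq_decide]
  exact_mod_cast Iff.rfl

lemma filter_ne_nil (string : String) (hpre : ¬ string.toList.Nodup) :
    string.toList.filter
        (fun i => decide (PySem.Str.count string (String.ofList [i]) > 1)) ≠ [] := by
  rw [List.nodup_iff_count_le_one] at hpre
  push_neg at hpre
  obtain ⟨a, ha⟩ := hpre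
  have hmem : a ∈ string.toList := by
    rw [← List.count_pos_iff]; omega
  refine List.ne_nil_of_mem (List.mem_filter.mpr ⟨hmem, ?_⟩)
  rw [str_count_char]
  simpa using ha

-- ===== VERDICT (by name: the statement is the Claim_ definition above) =====
theorem get_len_of_str_spec : Claim_equal_get_len_of_str := by
  intro string _ hpre
  unfold Pre_get_len_of_str at hpre
  unfold Spec_get_len_of_str
  rw [portA_eq, portB_eq, filters_eq]
  cases hL : (string.toList.filter
      (fun i => decide (PySem.Str.count string (String.ofList [i]) > 1))).getLast? with
  | none => exact absurd (List.getLast?_eq_none_iff.mp hL) (filter_ne_nil string hpre)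
  | some d => simpa using value_eq string d
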